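-- pv_equiv track=rewrite | github.com/0xQQa/NonogramSolver | SolvingGenerator.py | generate_all_posibilities
-- ===== SOURCE A (Python) =====
-- from itertools import chain, repeat
--
-- def generate_all_posibilities(minimal_solution: list, dimension: int) -> list[list]:
--     shuffle_count = dimension - (sum(minimal_solution) + minimal_solution.count(0))
--     leading_zeros = repeat(0, shuffle_count)
--     minimal_solution_vector = list(leading_zeros) + minimal_solution
--     all_possible_list_from_minimal_solution = [minimal_solution_vector.copy()]
--
--     for _ in range(shuffle_count):
--         tmp_minimal_solution_vector = minimal_solution_vector[1:] + [0]
--         minimal_solution_vector = tmp_minimal_solution_vector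
--         all_possible_list_from_minimal_solution.append(tmp_minimal_solution_vector)
--
--     return all_possible_list_from_minimal_solution
-- ===== SOURCE B (Python) =====
-- def generate_all_posibilities(minimal_solution: list, dimension: int) -> list:
--     shuffle_count = dimension - (sum(minimal_solution) + minimal_solution.count(0))
--     out = [[0] * shuffle_count + minimal_solution]
--     for i in range(1, shuffle_count + 1):
--         out.append([0] * (shuffle_count - i) + minimal_solution + [0] * i)
--     return out
-- ===== Notes on version B (the rewrite author's own statement) =====
-- stated objective: simpler
-- what changed: Each shifted vector is built directly from its index as [0]*(shuffle_count-i) + minimal_solution + [0]*i instead of repeatedly slice-shifting the previous vector.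
import Mathlib
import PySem

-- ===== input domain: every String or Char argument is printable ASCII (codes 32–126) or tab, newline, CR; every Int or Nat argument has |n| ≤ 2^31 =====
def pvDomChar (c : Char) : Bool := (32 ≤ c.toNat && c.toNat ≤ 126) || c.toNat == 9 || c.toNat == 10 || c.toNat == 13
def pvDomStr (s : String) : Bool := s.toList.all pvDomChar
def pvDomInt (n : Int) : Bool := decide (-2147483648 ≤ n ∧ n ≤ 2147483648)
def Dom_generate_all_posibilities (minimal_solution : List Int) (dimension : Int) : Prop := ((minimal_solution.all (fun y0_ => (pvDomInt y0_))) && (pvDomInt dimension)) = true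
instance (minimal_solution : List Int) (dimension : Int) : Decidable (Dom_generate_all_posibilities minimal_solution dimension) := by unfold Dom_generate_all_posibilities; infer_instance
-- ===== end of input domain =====

-- B builds each shifted vector directly from its index instead of A's repeated slice-shift of the previous vector (objective: simpler).


-- ===== PORT A =====
def generate_all_posibilities (minimal_solution : List Int) (dimension : Int) : List (List Int) :=
  let shuffle_count : Int := dimension - (minimal_solution.sum + PySem.List.count minimal_solution 0)
  -- list(repeat(0, shuffle_count)): a negative count yields the empty list, exactly toNat's clamp
  let minimal_solution_vector : List Int := List.replicate shuffle_count.toNat 0 ++ minimal_solution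
  -- for _ in range(shuffle_count): shift-and-append
  (((PySem.List.pyRange 0 shuffle_count 1).foldl
      (fun (st : List Int × List (List Int)) (_ : Int) =>
        let tmp := PySem.List.slice st.1 (some 1) none ++ [0]
        (tmp, st.2 ++ [tmp]))
      (minimal_solution_vector, [minimal_solution_vector]))).2

-- ===== PORT B =====
def generate_all_posibilities_alt (minimal_solution : List Int) (dimension : Int) : List (List Int) :=
  let shuffle_count : Int := dimension - (minimal_solution.sum + PySem.List.count minimal_solution 0)
  (PySem.List.pyRange 1 (shuffle_count + 1) 1).foldl
    (fun out i =>
      out ++ [PySem.List.pyRepeat [0] (shuffle_count - i) ++ minimal_solution ++ PySem.List.pyRepeat [0] i])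
    [PySem.List.pyRepeat [0] shuffle_count ++ minimal_solution]

-- ===== PRECONDITION & SPEC =====
def Spec_generate_all_posibilities (minimal_solution : List Int) (dimension : Int) (out : List (List Int)) : Prop := out = generate_all_posibilities_alt minimal_solution dimension
instance (minimal_solution : List Int) (dimension : Int) (out : List (List Int)) : Decidable (Spec_generate_all_posibilities minimal_solution dimension out) := by unfold Spec_generate_all_posibilities; infer_instance

-- ===== CLAIM (what is proved, stated in full; the proofs are below) =====
def Claim_equal_generate_all_posibilities : Prop := ∀ (minimal_solution : List Int) (dimension : Int), Dom_generate_all_posibilities minimal_solution dimension → Spec_generate_all_posibilities minimal_solution dimension (generate_all_posibilities minimal_solution dimension)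

-- ===== LEMMAS AND PROOFS =====

-- iterate an element-ignoring fold body
def pvIter {α : Type} (f : α → α) : Nat → α → α
  | 0, a => a
  | n + 1, a => pvIter f n (f a)

theorem pv_foldl_ignore {α β : Type} (f : α → α) (l : List β) (a : α) :
    l.foldl (fun x _ => f x) a = pvIter f l.length a := by
  induction l generalizing a with
  | nil => rfl
  | cons b t ih => simp [pvIter, ih]

-- invariant of A's shift loop, peeled from the front
theorem pv_iter_inv (ms : List Int) : ∀ (n j : Nat) (acc : List (List Int)),
    pvIter (fun (st : List Int × List (List Int)) =>
        let tmp := PySem.List.slice st.1 (some 1) none ++ [0]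
        (tmp, st.2 ++ [tmp])) n
      (List.replicate n 0 ++ ms ++ List.replicate j 0, acc)
    = (ms ++ List.replicate (n + j) 0,
       acc ++ (List.range n).map
         (fun k => List.replicate (n - 1 - k) 0 ++ ms ++ List.replicate (j + k + 1) 0)) := by
  intro n
  induction n with
  | zero => intro j acc; simp [pvIter]
  | succ n ih =>
    intro j acc
    have hrep : List.replicate j (0:Int) ++ [0] = List.replicate (j + 1) 0 :=
      (List.replicate_succ' (n := j) (a := (0:Int))).symm
    have hstep : PySem.List.slice (List.replicate (n + 1) 0 ++ ms ++ List.replicate j (0:Int)) (some 1) none ++ [0]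
        = List.replicate n 0 ++ ms ++ List.replicate (j + 1) 0 := by
      rw [PySem.List.slice_from_one]
      simp [List.replicate_succ, List.append_assoc, hrep]
    simp only [pvIter, hstep]
    rw [ih (j + 1) (acc ++ [List.replicate n 0 ++ ms ++ List.replicate (j + 1) 0])]
    rw [Prod.mk.injEq]
    refine ⟨?_, ?_⟩
    · have h1 : n + (j + 1) = n + 1 + j := by omega
      rw [h1]
    · rw [List.range_succ_eq_map]
      simp only [List.map_cons, List.map_map, Nat.add_sub_cancel, Nat.sub_zero]
      rw [List.append_assoc, List.singleton_append]
      congr 2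
      apply List.map_congr_left
      intro k hk
      simp only [Function.comp]
      have h2 : n - k.succ = n - 1 - k := by omega
      have h3 : j + k.succ + 1 = j + 1 + k + 1 := by omega
      rw [h2, h3]

theorem generate_all_posibilities_eq (ms : List Int) (d : Int) :
    generate_all_posibilities ms d = generate_all_posibilities_alt ms d := by
  unfold generate_all_posibilities generate_all_posibilities_alt
  set sc : Int := d - (ms.sum + PySem.List.count ms 0) with hsc
  simp only []
  -- A side: element-ignoring fold = iterate length times
  rw [pv_foldl_ignore]
  have hlen : (PySem.List.pyRange 0 sc 1).length = sc.toNat := by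
    rw [PySem.List.length_pyRange_one]; norm_num
  rw [hlen]
  have hA := pv_iter_inv ms sc.toNat 0 [List.replicate sc.toNat 0 ++ ms ++ List.replicate 0 0]
  simp only [List.replicate_zero, List.append_nil] at hA
  rw [hA]
  -- B side
  rw [PySem.List.foldl_append_singleton_eq_map, PySem.List.pyRange_one]
  have hb : (sc + 1 - 1).toNat = sc.toNat := by omega
  rw [hb, List.map_map]
  simp only [PySem.List.pyRepeat_singleton]
  congr 1
  apply List.map_congr_left
  intro k hk
  simp only [Function.comp]
  have hk' : (k : Int) < sc := by
    have := List.mem_range.mp hk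
    omega
  have h4 : (sc - (1 + (k : Int))).toNat = sc.toNat - 1 - k := by omega
  have h5 : ((1 : Int) + (k : Int)).toNat = k + 1 := by omega
  have h6 : 0 + k + 1 = k + 1 := by omega
  rw [h4, h5, h6]

-- ===== VERDICT (by name: the statement is the Claim_ definition above) =====
theorem generate_all_posibilities_spec : Claim_equal_generate_all_posibilities := by
  intro ms d _
  exact generate_all_posibilities_eq ms d
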